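-- pv_equiv track=rewrite | github.com/evaristolp/biogate-monorepo | backend/audits_schema.py | _build_column_mapping
-- ===== SOURCE A (Python) =====
-- def _normalize_header(h: str) -> str:
--     return h.strip().lower().replace(" ", "_")
--
-- def _build_column_mapping(raw_headers: list[str]) -> tuple[dict[str, str], dict[str, str]]:
--     """
--     Build a mapping from canonical field names -> original CSV header, using
--     a priority list of candidate header names. Returns (canonical_to_orig, normalized_map).
--     """
--     normalized_map = {_normalize_header(h): h for h in raw_headers}
--     headers_lower = set(normalized_map.keys())
--
--     def pick(candidates: list[str]) -> str | None:
--         for cand in candidates: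
--             key = _normalize_header(cand)
--             if key in headers_lower:
--                 return key
--         return None
--
--     # Vendor name column: prefer explicit "vendor_name", then common variants.
--     vendor_candidates = [
--         "vendor_name",
--         "vendor",
--         "vendor name",
--         "company",
--         "company_name",
--         "supplier",
--         "supplier_name",
--         "supplier name",
--         "name",
--     ]
--     country_candidates = [
--         "country",
--         "country_of_origin",
--         "vendor_country",
--         "country_code",
--     ]
--     parent_candidates = [
--         "parent_company",
--         "parent",
--         "parent company",
--         "ultimate_parent",
--         "ultimate_parent_company",
--     ]
--
--     canonical_to_orig: dict[str, str] = {}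
--
--     vendor_key = pick(vendor_candidates)
--     if vendor_key:
--         canonical_to_orig["vendor_name"] = normalized_map[vendor_key]
--
--     country_key = pick(country_candidates)
--     if country_key:
--         canonical_to_orig["country"] = normalized_map[country_key]
--
--     parent_key = pick(parent_candidates)
--     if parent_key:
--         canonical_to_orig["parent_company"] = normalized_map[parent_key]
--
--     return canonical_to_orig, normalized_map
-- ===== SOURCE B (Python) =====
-- # B: reverse index from normalized candidate header -> (canonical field, priority rank),
-- # then one pass over the headers keeping the lowest-rank match per canonical field.
--
-- def _normalize_header(h: str) -> str:
--     return h.strip().lower().replace(" ", "_")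
--
-- _FIELD_CANDIDATES = [
--     ("vendor_name", [
--         "vendor_name", "vendor", "vendor name", "company", "company_name",
--         "supplier", "supplier_name", "supplier name", "name",
--     ]),
--     ("country", [
--         "country", "country_of_origin", "vendor_country", "country_code",
--     ]),
--     ("parent_company", [
--         "parent_company", "parent", "parent company", "ultimate_parent",
--         "ultimate_parent_company",
--     ]),
-- ]
--
-- def _build_column_mapping(raw_headers: list[str]) -> tuple[dict[str, str], dict[str, str]]:
--     normalized_map = {_normalize_header(h): h for h in raw_headers}
--
--     index: dict[str, tuple[str, int]] = {}
--     for field, cands in _FIELD_CANDIDATES: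
--         for rank, cand in enumerate(cands):
--             key = _normalize_header(cand)
--             if key not in index:
--                 index[key] = (field, rank)
--
--     best: dict[str, tuple[int, str]] = {}
--     for key in normalized_map:
--         hit = index.get(key)
--         if hit is not None:
--             field, rank = hit
--             if field not in best or rank < best[field][0]:
--                 best[field] = (rank, key)
--
--     canonical_to_orig: dict[str, str] = {}
--     for field, _ in _FIELD_CANDIDATES:
--         if field in best:
--             canonical_to_orig[field] = normalized_map[best[field][1]]
--     return canonical_to_orig, normalized_map
-- ===== Notes on version B (the rewrite author's own statement) =====
-- stated objective: alternative
-- what changed: A scans each of three candidate lists against a set of normalized headers (first present candidate wins); B builds a reverse index from normalized candidate header to (field, priority rank) once and makes a single pass over the headers, keeping the lowest-rank hit per canonical field.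
import Mathlib
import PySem

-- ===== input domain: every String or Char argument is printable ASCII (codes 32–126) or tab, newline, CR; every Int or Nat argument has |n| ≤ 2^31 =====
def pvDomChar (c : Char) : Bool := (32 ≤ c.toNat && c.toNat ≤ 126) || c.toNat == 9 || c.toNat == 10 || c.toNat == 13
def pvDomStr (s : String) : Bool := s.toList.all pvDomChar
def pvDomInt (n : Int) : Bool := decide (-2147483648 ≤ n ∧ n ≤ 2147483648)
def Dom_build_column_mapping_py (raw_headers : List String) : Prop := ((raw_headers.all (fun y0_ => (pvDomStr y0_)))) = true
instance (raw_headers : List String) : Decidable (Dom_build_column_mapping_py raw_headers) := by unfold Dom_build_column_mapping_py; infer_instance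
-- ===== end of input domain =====

-- B replaces A's per-field scans over candidate lists by a reverse index (candidate key -> (field, rank))
-- and a single pass over the headers keeping the lowest-rank match per field; objective: alternative.

-- shared helper: _normalize_header (identical line in both sources)
def normalizeHeader (h : String) : String :=
  PySem.Str.replace (PySem.Str.lower (PySem.Str.strip h)) " " "_"

-- ===== PORT A =====
def pickA (headersLower : PySem.Set String) : List String → Option String
  | [] => none
  | cand :: rest =>
    let key := normalizeHeader cand
    if PySem.Set.contains headersLower key then some key else pickA headersLower rest

def build_column_mapping_py (raw_headers : List String) : (List (String × String)) × (List (String × String)) :=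
  let normalized_map : PySem.Dict String String :=
    raw_headers.foldl (fun d h => d.insert (normalizeHeader h) h) PySem.Dict.empty
  let headers_lower : PySem.Set String := PySem.Set.ofList normalized_map.keys
  let vendor_candidates : List String :=
    ["vendor_name", "vendor", "vendor name", "company", "company_name",
     "supplier", "supplier_name", "supplier name", "name"]
  let country_candidates : List String :=
    ["country", "country_of_origin", "vendor_country", "country_code"]
  let parent_candidates : List String :=
    ["parent_company", "parent", "parent company", "ultimate_parent", "ultimate_parent_company"]
  let canonical0 : PySem.Dict String String := PySem.Dict.empty
  -- 'if vendor_key:' — Python truthiness: None and "" are falsy.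
  -- normalized_map[key]: pick only returns keys present in the dict, so getD "" is exact here.
  let canonical1 :=
    match pickA headers_lower vendor_candidates with
    | some k => if k = "" then canonical0 else canonical0.insert "vendor_name" ((normalized_map.get? k).getD "")
    | none => canonical0
  let canonical2 :=
    match pickA headers_lower country_candidates with
    | some k => if k = "" then canonical1 else canonical1.insert "country" ((normalized_map.get? k).getD "")
    | none => canonical1
  let canonical3 :=
    match pickA headers_lower parent_candidates with
    | some k => if k = "" then canonical2 else canonical2.insert "parent_company" ((normalized_map.get? k).getD "")
    | none => canonical2
  (canonical3.items, normalized_map.items)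

-- ===== PORT B =====
def fieldCandidates : List (String × List String) :=
  [("vendor_name",
    ["vendor_name", "vendor", "vendor name", "company", "company_name",
     "supplier", "supplier_name", "supplier name", "name"]),
   ("country",
    ["country", "country_of_origin", "vendor_country", "country_code"]),
   ("parent_company",
    ["parent_company", "parent", "parent company", "ultimate_parent", "ultimate_parent_company"])]

-- the module-level reverse index of Source B
def buildIndexB : PySem.Dict String (String × Int) :=
  fieldCandidates.foldl (fun idx fc =>
    (PySem.List.enumerate fc.2 0).foldl (fun idx rc =>
      let key := normalizeHeader rc.2
      if idx.contains key then idx else idx.insert key (fc.1, rc.1)) idx)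
    PySem.Dict.empty

-- body of the single pass: keep the lowest-rank hit per canonical field
def bstepB (best : PySem.Dict String (Int × String)) (key : String) : PySem.Dict String (Int × String) :=
  match buildIndexB.get? key with
  | none => best
  | some fr =>
    match best.get? fr.1 with
    | none => best.insert fr.1 (fr.2, key)
    | some rk => if fr.2 < rk.1 then best.insert fr.1 (fr.2, key) else best

def build_column_mapping_py_alt (raw_headers : List String) : (List (String × String)) × (List (String × String)) :=
  let normalized_map : PySem.Dict String String :=
    raw_headers.foldl (fun d h => d.insert (normalizeHeader h) h) PySem.Dict.empty
  let best : PySem.Dict String (Int × String) :=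
    normalized_map.keys.foldl bstepB PySem.Dict.empty
  -- normalized_map[best[field][1]]: best only stores keys of the dict, so getD "" is exact here.
  let canonical_to_orig : PySem.Dict String String :=
    fieldCandidates.foldl (fun d fc =>
      match best.get? fc.1 with
      | none => d
      | some rk => d.insert fc.1 ((normalized_map.get? rk.2).getD "")) PySem.Dict.empty
  (canonical_to_orig.items, normalized_map.items)

-- ===== PRECONDITION & SPEC =====
def Spec_build_column_mapping_py (raw_headers : List String) (out : (List (String × String)) × (List (String × String))) : Prop := out = build_column_mapping_py_alt raw_headers
instance (raw_headers : List String) (out : (List (String × String)) × (List (String × String))) : Decidable (Spec_build_column_mapping_py raw_headers out) := by unfold Spec_build_column_mapping_py; infer_instance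

-- ===== CLAIM (what is proved, stated in full; the proofs are below) =====
def Claim_equal_build_column_mapping_py : Prop := ∀ (raw_headers : List String), Dom_build_column_mapping_py raw_headers → Spec_build_column_mapping_py raw_headers (build_column_mapping_py raw_headers)



-- ===== LEMMAS AND PROOFS =====

-- normalized forms of the candidate headers (closed facts)
theorem nhSpace1 : normalizeHeader "vendor name" = "vendor_name" := by decide
theorem nhSpace2 : normalizeHeader "supplier name" = "supplier_name" := by decide
theorem nhSpace3 : normalizeHeader "parent company" = "parent_company" := by decide
theorem nhId : ∀ s ∈ (["vendor_name","vendor","company","company_name","supplier","supplier_name","name",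
  "country","country_of_origin","vendor_country","country_code",
  "parent_company","parent","ultimate_parent","ultimate_parent_company"] : List String),
  normalizeHeader s = s := by decide

-- the reverse index of Source B, evaluated to its item list
def allPairs : List (String × (String × Int)) :=
  [("vendor_name",("vendor_name",0)),("vendor",("vendor_name",1)),("company",("vendor_name",3)),
   ("company_name",("vendor_name",4)),("supplier",("vendor_name",5)),("supplier_name",("vendor_name",6)),
   ("name",("vendor_name",8)),("country",("country",0)),("country_of_origin",("country",1)),
   ("vendor_country",("country",2)),("country_code",("country",3)),("parent_company",("parent_company",0)),
   ("parent",("parent_company",1)),("ultimate_parent",("parent_company",3)),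
   ("ultimate_parent_company",("parent_company",4))]

theorem indexEval : buildIndexB = PySem.Dict.mk allPairs := by
  simp [buildIndexB, fieldCandidates, allPairs, nhSpace1, nhSpace2, nhSpace3,
        PySem.List.enumerate_cons, PySem.Dict.insert, PySem.Dict.contains, PySem.Dict.empty,
        nhId "vendor_name" (by simp), nhId "vendor" (by simp), nhId "company" (by simp),
        nhId "company_name" (by simp), nhId "supplier" (by simp), nhId "supplier_name" (by simp),
        nhId "name" (by simp), nhId "country" (by simp), nhId "country_of_origin" (by simp),
        nhId "vendor_country" (by simp), nhId "country_code" (by simp), nhId "parent_company" (by simp),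
        nhId "parent" (by simp), nhId "ultimate_parent" (by simp), nhId "ultimate_parent_company" (by simp)]

-- per-field candidate (key, rank) tables, in priority order
def vendorPairs : List (String × Int) :=
  [("vendor_name",0),("vendor",1),("company",3),("company_name",4),("supplier",5),("supplier_name",6),("name",8)]
def countryPairs : List (String × Int) :=
  [("country",0),("country_of_origin",1),("vendor_country",2),("country_code",3)]
def parentPairs : List (String × Int) :=
  [("parent_company",0),("parent",1),("ultimate_parent",3),("ultimate_parent_company",4)]

-- first pair of P whose key occurs in K (= the candidate of minimal rank that is present)
def firstHit (P : List (String × Int)) (K : List String) : Option (Int × String) :=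
  match P with
  | [] => none
  | (c, r) :: P' => if c ∈ K then some (r, c) else firstHit P' K

def lookupP (P : List (String × Int)) (key : String) : Option (Int × String) :=
  match P with
  | [] => none
  | (c, r) :: P' => if c = key then some (r, key) else lookupP P' key

def lookupA {β : Type} : List (String × β) → String → Option β
  | [], _ => none
  | (c, v) :: t, k => if c = k then some v else lookupA t k

-- left-biased minimum on ranked hits
def mergeO (a b : Option (Int × String)) : Option (Int × String) :=
  match a, b with
  | none, b => b
  | a, none => a
  | some x, some y => if y.1 < x.1 then some y else some x

-- the single-field shadow of bstepB
def hitF (f : String) (key : String) : Option (Int × String) :=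
  (buildIndexB.get? key).bind (fun fr => if fr.1 = f then some (fr.2, key) else none)

def sstep (f : String) (acc : Option (Int × String)) (key : String) : Option (Int × String) :=
  mergeO acc (hitF f key)

theorem mergeO_none_left (b : Option (Int × String)) : mergeO none b = b := by
  cases b <;> rfl
theorem mergeO_none_right (a : Option (Int × String)) : mergeO a none = a := by
  cases a <;> rfl

theorem bstepB_get? (d : PySem.Dict String (Int × String)) (key f : String) :
    (bstepB d key).get? f = sstep f (d.get? f) key := by
  unfold bstepB sstep hitF
  cases hidx : buildIndexB.get? key with
  | none => simp only [Option.bind_none, mergeO_none_right]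
  | some fr =>
    simp only [Option.bind_some]
    by_cases hf : fr.1 = f
    · subst hf
      rw [if_pos rfl]
      cases hd : d.get? fr.1 with
      | none => simp [mergeO, PySem.Dict.get?_insert_self]
      | some rk =>
        simp only [mergeO]
        split_ifs with h <;> simp [PySem.Dict.get?_insert_self, hd]
    · have hne : f ≠ fr.1 := fun h => hf h.symm
      rw [if_neg hf, mergeO_none_right]
      cases hd : d.get? fr.1 with
      | none => rw [PySem.Dict.get?_insert_of_ne _ _ hne]
      | some rk =>
        dsimp only
        split_ifs with h
        · rw [PySem.Dict.get?_insert_of_ne _ _ hne]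
        · rfl

theorem foldl_bstepB_get? (K : List String) (d : PySem.Dict String (Int × String)) (f : String) :
    (K.foldl bstepB d).get? f = K.foldl (sstep f) (d.get? f) := by
  induction K generalizing d with
  | nil => rfl
  | cons k K ih => simp only [List.foldl_cons, ih, bstepB_get?]

theorem mergeO_assoc (a b c : Option (Int × String)) :
    mergeO (mergeO a b) c = mergeO a (mergeO b c) := by
  cases a with
  | none => rw [mergeO_none_left, mergeO_none_left]
  | some x =>
    cases b with
    | none => rw [mergeO_none_right, mergeO_none_left]
    | some y =>
      cases c with
      | none => rw [mergeO_none_right, mergeO_none_right]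
      | some z =>
        by_cases h1 : y.1 < x.1 <;> by_cases h2 : z.1 < y.1 <;> by_cases h3 : z.1 < x.1 <;>
          simp [mergeO, h1, h2, h3] <;> first | rfl | (exfalso; omega)

theorem foldl_sstep_acc (f : String) (K : List String) (acc : Option (Int × String)) :
    K.foldl (sstep f) acc = mergeO acc (K.foldl (sstep f) none) := by
  induction K generalizing acc with
  | nil => exact (mergeO_none_right acc).symm
  | cons k K ih =>
    simp only [List.foldl_cons]
    rw [ih (sstep f acc k), ih (sstep f none k)]
    simp only [sstep, mergeO_none_left, mergeO_assoc]

theorem firstHit_nil (P : List (String × Int)) : firstHit P [] = none := by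
  induction P with
  | nil => rfl
  | cons p P ih => obtain ⟨c, r⟩ := p; simp [firstHit, ih]

theorem firstHit_mem {P : List (String × Int)} {K : List String} {r : Int} {c : String}
    (h : firstHit P K = some (r, c)) : (c, r) ∈ P ∧ c ∈ K := by
  induction P with
  | nil => simp [firstHit] at h
  | cons p P ih =>
    obtain ⟨c', r'⟩ := p
    simp only [firstHit] at h
    split_ifs at h with hc
    · cases h; exact ⟨by simp, hc⟩
    · rcases ih h with ⟨h1, h2⟩; exact ⟨by simp [h1], h2⟩

theorem lookupP_some {P : List (String × Int)} {k : String} {x : Int × String}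
    (h : lookupP P k = some x) : x.2 = k ∧ (k, x.1) ∈ P := by
  induction P with
  | nil => simp [lookupP] at h
  | cons p P ih =>
    obtain ⟨c', r'⟩ := p
    simp only [lookupP] at h
    split_ifs at h with hc
    · cases h; exact ⟨rfl, by simp [hc]⟩
    · rcases ih h with ⟨h1, h2⟩; exact ⟨h1, by simp [h2]⟩

theorem lookupP_none {P : List (String × Int)} {k : String} (h : k ∉ P.map (·.1)) :
    lookupP P k = none := by
  induction P with
  | nil => rfl
  | cons p P ih =>
    obtain ⟨c, r⟩ := p
    simp only [List.map_cons, List.mem_cons, not_or] at h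
    simp only [lookupP]
    rw [if_neg (fun hc : c = k => h.1 hc.symm)]
    exact ih h.2

theorem mergeO_lookupP_firstHit (P : List (String × Int))
    (hP : P.Pairwise (fun p q => p.2 < q.2)) (k : String) (K : List String) :
    mergeO (lookupP P k) (firstHit P K) = firstHit P (k :: K) := by
  induction P with
  | nil => rfl
  | cons p P ih =>
    obtain ⟨c, r⟩ := p
    rcases List.pairwise_cons.mp hP with ⟨hhead, htail⟩
    simp only [lookupP, firstHit]
    by_cases hk : c = k
    · subst hk
      rw [if_pos rfl, if_pos (List.mem_cons_self)]
      by_cases hc : c ∈ K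
      · rw [if_pos hc]; simp [mergeO]
      · rw [if_neg hc]
        cases hfh : firstHit P K with
        | none => rfl
        | some rc =>
          obtain ⟨r', c'⟩ := rc
          have hm := firstHit_mem hfh
          have hlt : r < r' := hhead (c', r') hm.1
          simp [mergeO, show ¬ (r' < r) from by omega]
    · rw [if_neg hk]
      by_cases hc : c ∈ K
      · rw [if_pos hc, if_pos (List.mem_cons_of_mem _ hc)]
        cases hlk : lookupP P k with
        | none => rw [mergeO_none_left]
        | some x =>
          have hm := lookupP_some hlk
          have hlt : r < x.1 := hhead (k, x.1) hm.2
          simp [mergeO, hlt]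
      · rw [if_neg hc, if_neg (by simp [hk, hc] : ¬ c ∈ k :: K)]
        exact ih htail

theorem foldl_sstep_eq_firstHit (f : String) (P : List (String × Int))
    (hP : P.Pairwise (fun p q => p.2 < q.2))
    (hHit : ∀ k, hitF f k = lookupP P k) (K : List String) :
    K.foldl (sstep f) none = firstHit P K := by
  induction K with
  | nil => rw [firstHit_nil]; rfl
  | cons k K ih =>
    simp only [List.foldl_cons]
    rw [foldl_sstep_acc, ih]
    simp only [sstep, mergeO_none_left]
    rw [hHit, mergeO_lookupP_firstHit P hP k K]

theorem idx_get? : ∀ k, buildIndexB.get? k = lookupA allPairs k := by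
  intro k
  rw [indexEval]
  simp only [allPairs, PySem.Dict.get?_mk_cons, lookupA, beq_iff_eq]
  rfl

theorem allPairs_keys_nodup : (allPairs.map (·.1)).Nodup := by decide

theorem bind_lookupA_eq_lookupP (f : String) (L : List (String × (String × Int)))
    (hnd : (L.map (·.1)).Nodup) :
    ∀ k, (lookupA L k).bind (fun fr => if fr.1 = f then some (fr.2, k) else none)
      = lookupP ((L.filter (fun p => p.2.1 = f)).map (fun p => (p.1, p.2.2))) k := by
  induction L with
  | nil => intro k; rfl
  | cons p L ih =>
    obtain ⟨c, g, r⟩ := p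
    simp only [List.map_cons, List.nodup_cons] at hnd
    intro k
    by_cases hk : c = k
    · subst hk
      simp only [lookupA]
      rw [if_pos trivial]
      simp only [Option.bind_some]
      by_cases hg : g = f
      · subst hg
        simp [lookupP]
      · rw [if_neg hg]
        simp only [List.filter_cons, decide_eq_true_eq, hg, if_false]
        rw [lookupP_none]
        intro hmem
        apply hnd.1
        simp only [List.map_map, List.mem_map] at hmem
        rcases hmem with ⟨q, hq1, hq2⟩
        simp only [List.mem_map]
        exact ⟨q, List.mem_of_mem_filter hq1, hq2⟩
    · simp only [lookupA]
      rw [if_neg hk]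
      rw [ih hnd.2]
      simp only [List.filter_cons]
      by_cases hg : g = f
      · simp [hg, lookupP, hk]
      · simp [hg]

theorem hitF_vendor : ∀ k, hitF "vendor_name" k = lookupP vendorPairs k := by
  intro k
  rw [hitF, idx_get?, bind_lookupA_eq_lookupP _ _ allPairs_keys_nodup]
  rfl
theorem hitF_country : ∀ k, hitF "country" k = lookupP countryPairs k := by
  intro k
  rw [hitF, idx_get?, bind_lookupA_eq_lookupP _ _ allPairs_keys_nodup]
  rfl
theorem hitF_parent : ∀ k, hitF "parent_company" k = lookupP parentPairs k := by
  intro k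
  rw [hitF, idx_get?, bind_lookupA_eq_lookupP _ _ allPairs_keys_nodup]
  rfl

theorem pickA_vendor (K : List String) :
    pickA (PySem.Set.ofList K)
      ["vendor_name", "vendor", "vendor name", "company", "company_name",
       "supplier", "supplier_name", "supplier name", "name"] =
    (firstHit vendorPairs K).map (fun rk => rk.2) := by
  simp only [pickA, firstHit, vendorPairs, nhSpace1, nhSpace2,
    nhId "vendor_name" (by simp), nhId "vendor" (by simp), nhId "company" (by simp),
    nhId "company_name" (by simp), nhId "supplier" (by simp), nhId "supplier_name" (by simp),
    nhId "name" (by simp),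
    PySem.Set.contains_eq_listContains, List.contains_eq_mem, decide_eq_true_eq,
    PySem.Set.mem_ofList]
  split_ifs <;> rfl

theorem pickA_country (K : List String) :
    pickA (PySem.Set.ofList K)
      ["country", "country_of_origin", "vendor_country", "country_code"] =
    (firstHit countryPairs K).map (fun rk => rk.2) := by
  simp only [pickA, firstHit, countryPairs,
    nhId "country" (by simp), nhId "country_of_origin" (by simp),
    nhId "vendor_country" (by simp), nhId "country_code" (by simp),
    PySem.Set.contains_eq_listContains, List.contains_eq_mem, decide_eq_true_eq,
    PySem.Set.mem_ofList]
  split_ifs <;> rfl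

theorem pickA_parent (K : List String) :
    pickA (PySem.Set.ofList K)
      ["parent_company", "parent", "parent company", "ultimate_parent", "ultimate_parent_company"] =
    (firstHit parentPairs K).map (fun rk => rk.2) := by
  simp only [pickA, firstHit, parentPairs, nhSpace3,
    nhId "parent_company" (by simp), nhId "parent" (by simp),
    nhId "ultimate_parent" (by simp), nhId "ultimate_parent_company" (by simp),
    PySem.Set.contains_eq_listContains, List.contains_eq_mem, decide_eq_true_eq,
    PySem.Set.mem_ofList]
  split_ifs <;> rfl

theorem vendor_key_ne_empty {r : Int} {c : String} (h : (c, r) ∈ vendorPairs) : c ≠ "" := by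
  fin_cases h <;> decide
theorem country_key_ne_empty {r : Int} {c : String} (h : (c, r) ∈ countryPairs) : c ≠ "" := by
  fin_cases h <;> decide
theorem parent_key_ne_empty {r : Int} {c : String} (h : (c, r) ∈ parentPairs) : c ≠ "" := by
  fin_cases h <;> decide

theorem best_get? (K : List String) (f : String) (P : List (String × Int))
    (hP : P.Pairwise (fun p q => p.2 < q.2)) (hHit : ∀ k, hitF f k = lookupP P k) :
    (K.foldl bstepB PySem.Dict.empty).get? f = firstHit P K := by
  rw [foldl_bstepB_get?]
  exact foldl_sstep_eq_firstHit f P hP hHit K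

-- ===== VERDICT (by name: the statement is the Claim_ definition above) =====
theorem build_column_mapping_py_spec : Claim_equal_build_column_mapping_py := by
  intro raw_headers _
  unfold Spec_build_column_mapping_py build_column_mapping_py build_column_mapping_py_alt
  dsimp only
  simp only [fieldCandidates, List.foldl_cons, List.foldl_nil]
  rw [pickA_vendor, pickA_country, pickA_parent]
  rw [best_get? _ "vendor_name" vendorPairs (by decide) hitF_vendor,
      best_get? _ "country" countryPairs (by decide) hitF_country,
      best_get? _ "parent_company" parentPairs (by decide) hitF_parent]
  rcases hv : firstHit vendorPairs _ with _ | ⟨rv, cv⟩ <;>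
  rcases hc : firstHit countryPairs _ with _ | ⟨rc, cc⟩ <;>
  rcases hp : firstHit parentPairs _ with _ | ⟨rp, cp⟩ <;>
    simp only [Option.map_none, Option.map_some] <;>
    (try rw [if_neg (vendor_key_ne_empty (firstHit_mem hv).1)]) <;>
    (try rw [if_neg (country_key_ne_empty (firstHit_mem hc).1)]) <;>
    (try rw [if_neg (parent_key_ne_empty (firstHit_mem hp).1)])
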